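-- pv_equiv track=rewrite | github.com/Ibrahimddyy/StickerOP | bot.py | build_short_name
-- ===== SOURCE A (Python) =====
-- def build_short_name(user_id: int, kind: str, index: int, bot_username: str) -> str:
--     suffix = f"_by_{bot_username.lower()}"
--     core = f"stk_{user_id}_{kind}_{index}"
--     core = "".join(ch if ch.isalnum() or ch == "_" else "_" for ch in core)
--     core = "_".join(filter(None, core.split("_")))
--     core = core.strip("_")
--     if not core or not core[0].isalpha():
--         core = f"stk_{core}" if core else "stk"
--     name = f"{core}{suffix}"
--     name = name[:64]
--     if not name.endswith(suffix):
--         prefix_len = 64 - len(suffix)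
--         prefix = name[:prefix_len].rstrip("_")
--         name = f"{prefix}{suffix}"
--     return name[:64]
-- ===== SOURCE B (Python) =====
-- def _alnum_runs(s):
--     """Maximal alphanumeric runs of s, scanned with two index pointers."""
--     runs = []
--     i, n = 0, len(s)
--     while i < n:
--         if s[i].isalnum():
--             j = i
--             while j < n and s[j].isalnum():
--                 j += 1
--             runs.append(s[i:j])
--             i = j
--         else:
--             i += 1
--     return runs
--
--
-- def build_short_name(user_id: int, kind: str, index: int, bot_username: str) -> str:
--     suffix = "_by_" + bot_username.lower()
--     core = "_".join(_alnum_runs(f"stk_{user_id}_{kind}_{index}"))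
--     if not core[:1].isalpha():
--         core = "stk_" + core if core else "stk"
--     name = (core + suffix)[:64]
--     if name.endswith(suffix):
--         return name
--     cut = name[:64 - len(suffix)]
--     while cut.endswith("_"):
--         cut = cut[:-1]
--     return (cut + suffix)[:64]
-- ===== Notes on version B (the rewrite author's own statement) =====
-- stated objective: simpler
-- what changed: The core cleaning (map non-alnum to '_', split on '_', filter empties, rejoin, strip) becomes a two-pointer scan collecting maximal alphanumeric runs joined once with '_', and the truncation tail is restructured as an early return with a pop-last-character loop instead of an unconditional final re-slice.
import Mathlib
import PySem

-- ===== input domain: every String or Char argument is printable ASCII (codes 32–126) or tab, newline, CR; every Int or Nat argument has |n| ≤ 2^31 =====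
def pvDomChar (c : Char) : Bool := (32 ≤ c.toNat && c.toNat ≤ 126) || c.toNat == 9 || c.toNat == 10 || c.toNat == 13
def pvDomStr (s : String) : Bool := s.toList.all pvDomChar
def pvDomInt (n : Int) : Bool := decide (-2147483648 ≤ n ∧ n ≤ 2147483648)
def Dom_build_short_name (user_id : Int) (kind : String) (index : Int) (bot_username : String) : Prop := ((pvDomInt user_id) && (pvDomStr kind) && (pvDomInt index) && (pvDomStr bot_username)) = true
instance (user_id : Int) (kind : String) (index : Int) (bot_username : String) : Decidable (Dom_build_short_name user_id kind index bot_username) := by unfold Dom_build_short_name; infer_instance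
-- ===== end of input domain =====

-- B replaces A's replace/split/filter/join/strip core cleaning by a two-pointer scan for maximal
-- alphanumeric runs, and restructures the truncation tail (early return, pop-last-while loop);
-- objective: simpler.

-- ===== PORT A =====
-- ch if ch.isalnum() or ch == "_" else "_"
def pvF (c : Char) : Char := if PySem.Chars.isalnum c || c == '_' then c else '_'
-- core[0].isalpha(), guarded in A by the preceding `not core` (short-circuit, so no indexing error)
def pvHeadAlpha : List Char → Bool
  | [] => false
  | c :: _ => PySem.Chars.isalpha c

def build_short_name (user_id : Int) (kind : String) (index : Int) (bot_username : String) : String :=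
  let suffix := ('_'::'b'::'y'::'_'::[]) ++ PySem.Chars.lower bot_username.toList
  let core0 := ('s'::'t'::'k'::'_'::[]) ++ PySem.Int.toChars user_id ++ ['_'] ++ kind.toList ++ ['_'] ++ PySem.Int.toChars index
  let core1 := core0.map pvF
  -- "_".join(filter(None, core.split("_")))
  let core2 := PySem.Chars.join ['_'] ((PySem.Chars.splitOn core1 ['_']).filter (fun p => !p.isEmpty))
  let core3 := PySem.Chars.stripChars core2 ['_']
  let core4 := if core3.isEmpty || !(pvHeadAlpha core3) then
      (if !core3.isEmpty then ('s'::'t'::'k'::'_'::[]) ++ core3 else ['s','t','k'])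
    else core3
  let name0 := PySem.List.slice (core4 ++ suffix) none (some 64)
  let name1 := if !(PySem.Chars.endswith name0 suffix) then
      -- name[:prefix_len].rstrip("_"): rstrip with the single char '_' is exactly
      -- reverse / dropWhile (· == '_') / reverse (hand port; PySem has no rstrip-with-chars)
      (((PySem.List.slice name0 none (some (64 - (suffix.length : Int)))).reverse.dropWhile (fun c => c == '_')).reverse) ++ suffix
    else name0
  String.ofList (PySem.List.slice name1 none (some 64))

-- ===== PORT B =====
-- _alnum_runs: the outer while-loop advances over one maximal alphanumeric run (found by the
-- inner j-loop = takeWhile, resuming at j = dropWhile) or over one separator char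
def pvRuns : List Char → List (List Char)
  | [] => []
  | c :: cs =>
      if PySem.Chars.isalnum c then
        (c :: cs.takeWhile PySem.Chars.isalnum) :: pvRuns (cs.dropWhile PySem.Chars.isalnum)
      else pvRuns cs
termination_by xs => xs.length
decreasing_by
· have := List.length_dropWhile_le PySem.Chars.isalnum cs
  simp; omega
· simp

-- while cut.endswith("_"): cut = cut[:-1]   (cut[:-1] = dropLast, PySem.List.slice_to_neg_one)
def pvCut (xs : List Char) : List Char :=
  if h : PySem.Chars.endswith xs ['_'] then pvCut xs.dropLast else xs
termination_by xs.length
decreasing_by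
  have h' := (PySem.Chars.endswith_iff xs ['_']).mp h
  have hne : xs ≠ [] := by rintro rfl; simp at h'
  have := List.length_pos_of_ne_nil hne
  simp [List.length_dropLast]; omega

def build_short_name_alt (user_id : Int) (kind : String) (index : Int) (bot_username : String) : String :=
  let suffix := ("_by_" ++ PySem.Str.lower bot_username).toList
  let core0 := List.intercalate ['_']
      (pvRuns ("stk_" ++ PySem.Int.toStr user_id ++ "_" ++ kind ++ "_" ++ PySem.Int.toStr index).toList)
  -- not core[:1].isalpha()
  let core := if !PySem.Chars.strIsalpha (PySem.List.slice core0 none (some 1)) then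
      (if !core0.isEmpty then "stk_".toList ++ core0 else "stk".toList)
    else core0
  let name := PySem.List.slice (core ++ suffix) none (some 64)
  if PySem.Chars.endswith name suffix then String.ofList name
  else
    let cut := pvCut (PySem.List.slice name none (some (64 - (suffix.length : Int))))
    String.ofList (PySem.List.slice (cut ++ suffix) none (some 64))

-- ===== PRECONDITION & SPEC =====
def Spec_build_short_name (user_id : Int) (kind : String) (index : Int) (bot_username : String) (out : String) : Prop := out = build_short_name_alt user_id kind index bot_username
instance (user_id : Int) (kind : String) (index : Int) (bot_username : String) (out : String) : Decidable (Spec_build_short_name user_id kind index bot_username out) := by unfold Spec_build_short_name; infer_instance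

-- ===== CLAIM (what is proved, stated in full; the proofs are below) =====
def Claim_equal_build_short_name : Prop := ∀ (user_id : Int) (kind : String) (index : Int) (bot_username : String), Dom_build_short_name user_id kind index bot_username → Spec_build_short_name user_id kind index bot_username (build_short_name user_id kind index bot_username)

-- ===== LEMMAS AND PROOFS =====

-- pvSpl cs = cs.split("_") (pieces between '_' separators)
def pvSpl : List Char → List (List Char)
  | [] => [[]]
  | c :: cs => if c = '_' then [] :: pvSpl cs else
      match pvSpl cs with
      | [] => [[c]]
      | p :: ps => (c :: p) :: ps

theorem pvSpl_ne_nil (cs : List Char) : pvSpl cs ≠ [] := by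
  cases cs with
  | nil => simp [pvSpl]
  | cons c cs => simp only [pvSpl]; split; · simp
                 · split <;> simp

theorem pvGo_eq (cs : List Char) : ∀ (fuel : Nat), cs.length ≤ fuel → ∀ (cur : List Char) (acc : List (List Char)),
    PySem.Chars.splitOn.go ['_'] fuel cs cur acc = acc.reverse ++ (pvSpl cs).modifyHead (fun p => cur.reverse ++ p) := by
  induction cs with
  | nil =>
    intro fuel _ cur acc
    cases fuel <;> simp [PySem.Chars.splitOn.go, pvSpl]
  | cons c cs ih =>
    intro fuel hf cur acc
    cases fuel with
    | zero => simp at hf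
    | succ f =>
      simp only [PySem.Chars.splitOn.go]
      by_cases hc : c = '_'
      · subst hc
        rw [if_pos (by simp [List.isPrefixOf])]
        simp only [List.length_cons, List.length_nil, List.drop_succ_cons, List.drop_zero]
        rw [ih f (by simpa using hf) [] (cur.reverse :: acc)]
        simp only [pvSpl, List.reverse_cons]
        generalize pvSpl cs = L
        cases L <;> simp
      · rw [if_neg (by simp [List.isPrefixOf]; exact fun h => hc h.symm)]
        rw [ih f (by simp at hf; omega) (c :: cur) acc]
        simp only [pvSpl, if_neg hc]
        rcases h : pvSpl cs with _ | ⟨p, ps⟩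
        · exact absurd h (pvSpl_ne_nil cs)
        · simp

theorem pvSplitOn_eq (cs : List Char) : PySem.Chars.splitOn cs ['_'] = pvSpl cs := by
  unfold PySem.Chars.splitOn
  rw [pvGo_eq cs (cs.length + 1) (by omega) [] []]
  generalize pvSpl cs = L
  cases L <;> simp

theorem pvSpl_no_us (cs : List Char) : ∀ p ∈ pvSpl cs, '_' ∉ p := by
  induction cs with
  | nil => simp [pvSpl]
  | cons c cs ih =>
    intro p hp
    simp only [pvSpl] at hp
    by_cases hc : c = '_'
    · rw [if_pos hc] at hp
      rcases List.mem_cons.mp hp with h | h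
      · simp [h]
      · exact ih p h
    · rw [if_neg hc] at hp
      cases h : pvSpl cs with
      | nil => exact absurd h (pvSpl_ne_nil cs)
      | cons q qs =>
        rw [h] at hp
        rcases List.mem_cons.mp hp with h1 | h1
        · subst h1
          intro hmem
          rcases List.mem_cons.mp hmem with h2 | h2
          · exact hc h2.symm
          · exact ih q (by rw [h]; exact List.mem_cons_self) h2
        · exact ih p (by rw [h]; exact List.mem_cons_of_mem _ h1)

-- tail of pvSpl after the first maximal alnum run (the next char, if any, maps to '_')
def pvSplRest : List Char → List (List Char)
  | [] => []
  | _ :: rest => pvSpl (rest.map pvF)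

theorem pvF_alnum {c : Char} (h : PySem.Chars.isalnum c = true) : pvF c = c := by
  simp [pvF, h]

theorem pvF_not_alnum {c : Char} (h : ¬ PySem.Chars.isalnum c = true) : pvF c = '_' := by
  by_cases hu : c = '_'
  · simp [pvF, hu]
  · simp [pvF, h, hu]

theorem pvSpl_head (cs : List Char) :
    pvSpl (cs.map pvF) = cs.takeWhile PySem.Chars.isalnum :: pvSplRest (cs.dropWhile PySem.Chars.isalnum) := by
  induction cs with
  | nil => simp [pvSpl, pvSplRest]
  | cons c cs ih =>
    by_cases hc : PySem.Chars.isalnum c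
    · have hfc := pvF_alnum hc
      have hcu : c ≠ '_' := by intro h; subst h; exact absurd hc (by decide)
      simp only [List.map_cons, hfc, pvSpl, if_neg hcu, ih,
        List.takeWhile_cons_of_pos hc, List.dropWhile_cons_of_pos hc]
    · have hfc := pvF_not_alnum hc
      rw [List.takeWhile_cons_of_neg (by simpa using hc), List.dropWhile_cons_of_neg (by simpa using hc)]
      simp [pvSpl, hfc, pvSplRest]

theorem pvHead_dropWhile {l : List Char} {d : Char} {rest : List Char}
    (h : l.dropWhile PySem.Chars.isalnum = d :: rest) : ¬ PySem.Chars.isalnum d = true := by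
  induction l with
  | nil => simp at h
  | cons a t ih =>
    by_cases ha : PySem.Chars.isalnum a
    · rw [List.dropWhile_cons_of_pos ha] at h; exact ih h
    · rw [List.dropWhile_cons_of_neg ha] at h; cases h; exact ha

theorem pvRuns_cons_neg {c : Char} (hc : ¬ PySem.Chars.isalnum c = true) (cs : List Char) :
    pvRuns (c :: cs) = pvRuns cs := by
  rw [pvRuns, if_neg hc]

theorem pvRuns_eq (cs : List Char) :
    (pvSpl (cs.map pvF)).filter (fun p => !p.isEmpty) = pvRuns cs := by
  induction cs using pvRuns.induct with
  | case1 => simp [pvSpl, pvRuns]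
  | case2 c cs hc ih =>
    rw [pvSpl_head, pvRuns]
    rw [if_pos hc, List.takeWhile_cons_of_pos hc, List.dropWhile_cons_of_pos hc]
    rw [List.filter_cons_of_pos (by simp)]
    congr 1
    cases hd : cs.dropWhile PySem.Chars.isalnum with
    | nil => simp [pvSplRest, pvRuns]
    | cons d rest =>
      have hdna : ¬ PySem.Chars.isalnum d = true := pvHead_dropWhile hd
      rw [hd] at ih
      rw [List.map_cons, pvF_not_alnum hdna] at ih
      rw [pvRuns_cons_neg hdna] at ih
      rw [show pvSpl ('_' :: List.map pvF rest) = [] :: pvSpl (List.map pvF rest) by simp [pvSpl]] at ih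
      rw [List.filter_cons_of_neg (by simp)] at ih
      rw [pvSplRest, pvRuns_cons_neg hdna]
      exact ih
  | case3 c cs hc ih =>
    have hfc := pvF_not_alnum hc
    rw [pvRuns_cons_neg hc, ← ih]
    simp only [List.map_cons, hfc]
    rw [show pvSpl ('_' :: List.map pvF cs) = [] :: pvSpl (List.map pvF cs) by simp [pvSpl]]
    simp

def pvH : List (List Char) → Bool → Bool → List Char
  | [], _, _ => []
  | p :: ps, ne, prev =>
      (if p.isEmpty then [] else (if ne && !prev then ['_'] else []) ++ p) ++ pvH ps (ne || !p.isEmpty) false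

theorem pvJoin_cons (p : List Char) (M : List (List Char)) :
    PySem.Chars.join ['_'] (p :: M) = p ++ (M.map (fun q => '_' :: q)).flatten := by
  induction M generalizing p with
  | nil => simp [PySem.Chars.join, List.intercalate]
  | cons q qs ih =>
    simp only [PySem.Chars.join, List.intercalate] at *
    simp [List.intersperse_cons₂, ih]

theorem pvJoin_cons₂ (p q : List Char) (t : List (List Char)) :
    PySem.Chars.join ['_'] (p :: q :: t) = p ++ '_' :: PySem.Chars.join ['_'] (q :: t) := by
  rw [pvJoin_cons, pvJoin_cons]
  simp

theorem pvStrip_noop (s : List Char)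
    (h1 : ∀ c, s.head? = some c → c ≠ '_') (h2 : ∀ c, s.getLast? = some c → c ≠ '_') :
    PySem.Chars.stripChars s ['_'] = s := by
  unfold PySem.Chars.stripChars
  show (List.dropWhile (fun c => List.contains ['_'] c) (List.dropWhile (fun c => List.contains ['_'] c) s).reverse).reverse = s
  have hd : List.dropWhile (fun c => List.contains ['_'] c) s = s := by
    cases s with
    | nil => rfl
    | cons a l =>
      rw [List.dropWhile_cons_of_neg]
      have := h1 a rfl
      simp [this]
  rw [hd]
  have hd2 : List.dropWhile (fun c => List.contains ['_'] c) s.reverse = s.reverse := by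
    cases hr : s.reverse with
    | nil => rfl
    | cons a l =>
      rw [List.dropWhile_cons_of_neg]
      have ha : s.getLast? = some a := by
        rw [← List.head?_reverse, hr]; rfl
      have := h2 a ha
      simp [this]
  rw [hd2, List.reverse_reverse]

theorem pvJoin_head (M : List (List Char)) (hM : ∀ p ∈ M, p ≠ [] ∧ '_' ∉ p) :
    ∀ c, (PySem.Chars.join ['_'] M).head? = some c → c ≠ '_' := by
  cases M with
  | nil => intro c h; simp [PySem.Chars.join, List.intercalate] at h
  | cons p M' =>
    intro c h
    rw [pvJoin_cons] at h
    obtain ⟨hne, hus⟩ := hM p List.mem_cons_self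
    cases p with
    | nil => exact absurd rfl hne
    | cons a l =>
      simp at h
      subst h
      exact fun hh => hus (by simp [hh])

theorem pvJoin_last (M : List (List Char)) (hM : ∀ p ∈ M, p ≠ [] ∧ '_' ∉ p) :
    ∀ c, (PySem.Chars.join ['_'] M).getLast? = some c → c ≠ '_' := by
  induction M with
  | nil => intro c h; simp [PySem.Chars.join, List.intercalate] at h
  | cons p M' ih =>
    intro c h
    cases M' with
    | nil =>
      rw [pvJoin_cons] at h
      simp at h
      obtain ⟨hne, hus⟩ := hM p List.mem_cons_self
      intro hc
      subst hc
      exact hus (List.mem_of_getLast? h)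
    | cons q t =>
      rw [pvJoin_cons₂, List.getLast?_append_of_ne_nil p (by simp)] at h
      have hJne : PySem.Chars.join ['_'] (q :: t) ≠ [] := by
        rw [pvJoin_cons]
        obtain ⟨hne, _⟩ := hM q (by simp)
        simp [hne]
      have heq : ('_' :: PySem.Chars.join ['_'] (q :: t)).getLast? = (PySem.Chars.join ['_'] (q :: t)).getLast? := by
        have h2 := List.getLast?_append_of_ne_nil ['_'] hJne
        simpa using h2
      rw [heq] at h
      exact ih (fun r hr => hM r (List.mem_cons_of_mem _ hr)) c h

-- A's cleaned core equals B's intercalated runs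
theorem pvCore_eq (cs : List Char) :
    PySem.Chars.stripChars (PySem.Chars.join ['_'] ((PySem.Chars.splitOn (cs.map pvF) ['_']).filter (fun p => !p.isEmpty))) ['_']
      = List.intercalate ['_'] (pvRuns cs) := by
  rw [pvSplitOn_eq]
  have hM : ∀ p ∈ (pvSpl (cs.map pvF)).filter (fun p => !p.isEmpty), p ≠ [] ∧ '_' ∉ p := by
    intro p hp
    rw [List.mem_filter] at hp
    exact ⟨by simpa using hp.2, pvSpl_no_us _ p hp.1⟩
  rw [pvStrip_noop _ (pvJoin_head _ hM) (pvJoin_last _ hM), pvRuns_eq]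
  rfl

-- B's head test equals A's
theorem pvHead_eq (core : List Char) :
    (core.isEmpty || !(pvHeadAlpha core)) = !PySem.Chars.strIsalpha (PySem.List.slice core none (some 1)) := by
  have h1 : PySem.List.slice core none (some 1) = core.take 1 := by
    simpa using PySem.List.slice_to_natCast core 1
  cases core with
  | nil => simp [h1, PySem.Chars.strIsalpha]
  | cons c l => simp [h1, pvHeadAlpha, PySem.Chars.strIsalpha]

-- the pop-last-while loop equals rstrip("_")
theorem pvCut_eq (xs : List Char) :
    pvCut xs = (xs.reverse.dropWhile (fun c => c == '_')).reverse := by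
  induction xs using pvCut.induct with
  | case1 xs h ih =>
    obtain ⟨ys, hx⟩ := (PySem.Chars.endswith_iff xs ['_']).mp h
    rw [pvCut, dif_pos h, ih]
    subst hx
    rw [List.dropLast_concat]
    simp [List.dropWhile_cons_of_pos]
  | case2 xs h =>
    rw [pvCut, dif_neg h]
    rcases List.eq_nil_or_concat xs with rfl | ⟨ys, c, hx⟩
    · rfl
    · subst hx
      have hc : ¬ (c == '_') = true := by
        intro hc
        apply h
        rw [PySem.Chars.endswith_iff]
        exact ⟨ys, by simp [List.concat_eq_append, eq_of_beq hc]⟩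
      rw [List.concat_eq_append, List.reverse_append]
      simp only [List.reverse_singleton, List.singleton_append]
      rw [List.dropWhile_cons_of_neg (p := fun x => x == '_') hc]
      simp

-- slicing to 64 is idempotent
theorem pvSlice64 (xs : List Char) :
    PySem.List.slice (PySem.List.slice xs none (some 64)) none (some 64) = PySem.List.slice xs none (some 64) := by
  have h : ∀ ys : List Char, PySem.List.slice ys none (some 64) = ys.take 64 := by
    intro ys; simpa using PySem.List.slice_to_natCast ys 64
  simp [h, List.take_take]

-- ===== VERDICT (by name: the statement is the Claim_ definition above) =====
theorem build_short_name_spec : Claim_equal_build_short_name := by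
  intro user_id kind index bot_username _
  unfold Spec_build_short_name
  have hsuf : ("_by_" ++ PySem.Str.lower bot_username).toList
      = ('_'::'b'::'y'::'_'::[]) ++ PySem.Chars.lower bot_username.toList := by simp
  have hraw : ("stk_" ++ PySem.Int.toStr user_id ++ "_" ++ kind ++ "_" ++ PySem.Int.toStr index).toList
      = ('s'::'t'::'k'::'_'::[]) ++ PySem.Int.toChars user_id ++ ['_'] ++ kind.toList ++ ['_'] ++ PySem.Int.toChars index := by
    simp
  simp only [build_short_name, build_short_name_alt, hsuf, hraw, ← pvCore_eq, ← pvHead_eq, pvCut_eq]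
  have hstk4 : "stk_".toList = ['s','t','k','_'] := by simp
  have hstk : "stk".toList = ['s','t','k'] := by simp
  rw [hstk4, hstk]
  set core3 := PySem.Chars.stripChars (PySem.Chars.join ['_'] ((PySem.Chars.splitOn ((('s'::'t'::'k'::'_'::[]) ++ PySem.Int.toChars user_id ++ ['_'] ++ kind.toList ++ ['_'] ++ PySem.Int.toChars index).map pvF) ['_']).filter (fun p => !p.isEmpty))) ['_'] with hc3
  set suffix := ('_'::'b'::'y'::'_'::[]) ++ PySem.Chars.lower bot_username.toList with hsfx
  set core4 := if (core3.isEmpty || !(pvHeadAlpha core3)) = true then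
      (if !core3.isEmpty then ('s'::'t'::'k'::'_'::[]) ++ core3 else ['s','t','k'])
    else core3 with hc4
  by_cases hend : PySem.Chars.endswith (PySem.List.slice (core4 ++ suffix) none (some 64)) suffix
  · simp [hend, pvSlice64]
  · simp [hend]
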